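-- pv_equiv track=rewrite | github.com/dante454/Casptone | Axeno de intentos pasados/caso_base_3000.py | procesar_tiempos
-- ===== SOURCE A (Python) =====
-- def procesar_tiempos(all_llegadas, division_minutos):
--     arribos_por_minuto_list = []
--     for llegadas in all_llegadas:
--         arribos_por_minuto = {}
--         for tiempo in llegadas:
--             minuto = tiempo // division_minutos
--             if minuto in arribos_por_minuto:
--                 arribos_por_minuto[minuto] += 1
--             else:
--                 arribos_por_minuto[minuto] = 1
--         arribos_por_minuto_list.append(arribos_por_minuto)
--     return arribos_por_minuto_list
-- ===== SOURCE B (Python) =====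
-- def procesar_tiempos(all_llegadas, division_minutos):
--     def agrupar(minutos):
--         # recursive partition: peel the first minute's whole group, recurse on the rest
--         if not minutos:
--             return {}
--         m = minutos[0]
--         resto = [x for x in minutos if x != m]
--         grupos = {m: len(minutos) - len(resto)}
--         grupos.update(agrupar(resto))
--         return grupos
--     return [agrupar([t // division_minutos for t in llegadas])
--             for llegadas in all_llegadas]
-- ===== Notes on version B (the rewrite author's own statement) =====
-- stated objective: alternative
-- what changed: B replaces A's single hash-accumulating scan with a membership-tested dict by a recursive partition: map times to minutes once, then repeatedly peel the first minute's whole group off the list (filter + length difference) and recurse on the remainder, which reproduces A's first-occurrence key order without any dict accumulation.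
import Mathlib
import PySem

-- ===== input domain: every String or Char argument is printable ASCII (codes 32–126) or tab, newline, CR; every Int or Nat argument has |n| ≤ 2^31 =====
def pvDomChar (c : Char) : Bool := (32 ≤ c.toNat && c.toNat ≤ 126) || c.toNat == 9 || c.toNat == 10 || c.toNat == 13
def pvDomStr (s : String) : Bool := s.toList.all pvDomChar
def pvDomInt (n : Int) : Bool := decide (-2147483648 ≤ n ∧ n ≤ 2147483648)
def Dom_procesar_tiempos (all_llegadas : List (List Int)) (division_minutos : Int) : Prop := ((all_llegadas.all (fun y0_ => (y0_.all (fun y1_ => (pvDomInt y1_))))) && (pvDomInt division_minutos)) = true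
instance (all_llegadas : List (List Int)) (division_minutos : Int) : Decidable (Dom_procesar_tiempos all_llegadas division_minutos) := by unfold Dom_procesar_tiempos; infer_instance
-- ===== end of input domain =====

-- B replaces A's hash-accumulating scan by a recursive partition: peel the first minute's
-- whole group off the mapped list (filter + length difference) and recurse on the remainder.


-- ===== PORT A =====
def procesar_tiempos (all_llegadas : List (List Int)) (division_minutos : Int) : List (List (Int × Int)) :=
  all_llegadas.foldl (fun acc llegadas =>
    let arribos := llegadas.foldl (fun dic tiempo =>
      let minuto := PySem.Int.floordiv tiempo division_minutos
      if dic.contains minuto then dic.insert minuto (dic.getD minuto 0 + 1)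
      else dic.insert minuto 1) (PySem.Dict.empty : PySem.Dict Int Int)
    acc ++ [arribos.items]) []

-- ===== PORT B =====
-- recursive partition: {first minute ↦ its multiplicity} followed by the groups of the rest
def agrupar : List Int → List (Int × Int)
  | [] => []
  | m :: rest =>
      let minutos := m :: rest
      let resto := minutos.filter (fun x => x ≠ m)
      (m, ((minutos.length : Int) - (resto.length : Int))) :: agrupar resto
termination_by l => l.length
decreasing_by
  rw [List.filter_cons]
  have h2 := List.length_filter_le (fun x => decide (x ≠ m)) rest
  simp only [ne_eq, not_true, decide_false, Bool.false_eq_true, if_false, List.length_cons] at h2 ⊢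
  omega

def procesar_tiempos_alt (all_llegadas : List (List Int)) (division_minutos : Int) : List (List (Int × Int)) :=
  all_llegadas.map (fun llegadas =>
    agrupar (llegadas.map (fun t => PySem.Int.floordiv t division_minutos)))

-- ===== PRECONDITION & SPEC =====
-- Pre_ excludes exactly the inputs where Python raises ZeroDivisionError:
-- division_minutos = 0 with some nonempty sublist (both A and B raise there).
def Pre_procesar_tiempos (all_llegadas : List (List Int)) (division_minutos : Int) : Prop :=
  division_minutos = 0 → all_llegadas.all List.isEmpty = true
instance (all_llegadas : List (List Int)) (division_minutos : Int) : Decidable (Pre_procesar_tiempos all_llegadas division_minutos) := by unfold Pre_procesar_tiempos; infer_instance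
def pvWitness_procesar_tiempos : List (List Int) × Int := ([[0, 1, 2, 5], [7]], 2)
def Spec_procesar_tiempos (all_llegadas : List (List Int)) (division_minutos : Int) (out : List (List (Int × Int))) : Prop := out = procesar_tiempos_alt all_llegadas division_minutos
instance (all_llegadas : List (List Int)) (division_minutos : Int) (out : List (List (Int × Int))) : Decidable (Spec_procesar_tiempos all_llegadas division_minutos out) := by unfold Spec_procesar_tiempos; infer_instance

-- ===== CLAIM (what is proved, stated in full; the proofs are below) =====
def Claim_equal_procesar_tiempos : Prop := ∀ (all_llegadas : List (List Int)) (division_minutos : Int), Dom_procesar_tiempos all_llegadas division_minutos → Pre_procesar_tiempos all_llegadas division_minutos → Spec_procesar_tiempos all_llegadas division_minutos (procesar_tiempos all_llegadas division_minutos)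

-- ===== LEMMAS AND PROOFS =====

-- membership is preserved by Set.add
theorem contains_set_add (s : List Int) (x m : Int) (h : s.contains m = true) :
    (PySem.Set.add s x).contains m = true := by
  unfold PySem.Set.add
  split <;> simp_all

-- adding elements equal to an already-present m is a no-op: they can be filtered out
theorem foldl_add_filter_ne (l : List Int) (s : List Int) (h : s.contains m = true) :
    l.foldl PySem.Set.add s = (l.filter (fun x => x ≠ m)).foldl PySem.Set.add s := by
  induction l generalizing s with
  | nil => rfl
  | cons x xs ih =>
    by_cases hx : x = m
    · subst hx
      have hadd : PySem.Set.add s x = s := by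
        show (if s.contains x = true then s else s ++ [x]) = s
        rw [if_pos h]
      simpa [hadd] using ih s h
    · simpa [hx] using ih (PySem.Set.add s x) (contains_set_add s x m h)

-- a head element no later element equals stays at the head through the fold
theorem foldl_add_head (l : List Int) (s : List Int) (m : Int)
    (h : ∀ x ∈ l, x ≠ m) :
    l.foldl PySem.Set.add (m :: s) = m :: l.foldl PySem.Set.add s := by
  induction l generalizing s with
  | nil => rfl
  | cons x xs ih =>
    have hxm : (x == m) = false := by simp [h x (List.mem_cons_self)]
    have hxm' : ¬ x = m := h x List.mem_cons_self
    have hstep : PySem.Set.add (m :: s) x = m :: PySem.Set.add s x := by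
      by_cases hc : x ∈ s <;> simp [PySem.Set.add, hxm', hc]
    simp only [List.foldl_cons, hstep]
    exact ih (PySem.Set.add s x) (fun y hy => h y (List.mem_cons_of_mem _ hy))

-- PySem's first-occurrence dedup peels the head group
theorem dedup_cons_filter (m : Int) (rest : List Int) :
    PySem.List.dedup (m :: rest) = m :: PySem.List.dedup (rest.filter (fun x => x ≠ m)) := by
  unfold PySem.List.dedup PySem.Set.ofList
  simp only [List.foldl_cons]
  have hempty : PySem.Set.add (PySem.Set.empty : PySem.Set Int) m = [m] := by
    unfold PySem.Set.add PySem.Set.empty; simp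
  rw [hempty]
  rw [foldl_add_filter_ne (m := m) rest [m] (by simp)]
  exact foldl_add_head _ [] m (by
    intro x hx
    have := List.of_mem_filter hx
    simpa using this)

-- counting survives filtering out a different value
theorem count_filter_ne (l : List Int) (k m : Int) (hk : k ≠ m) :
    (l.filter (fun x => x ≠ m)).count k = l.count k := by
  induction l with
  | nil => rfl
  | cons x xs ih =>
    by_cases hx : x = m
    · subst hx
      simpa [List.count_cons, Ne.symm hk] using ih
    · simpa [hx, List.count_cons] using ih

-- a list splits into the elements equal to m and those not
theorem length_filter_add_count (m : Int) (l : List Int) :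
    l.length = (l.filter (fun x => x ≠ m)).length + l.count m := by
  induction l with
  | nil => rfl
  | cons x xs ih =>
    by_cases hx : x = m <;>
      simp [hx, ih] <;> omega

-- B's recursive partition computes exactly {distinct minute ↦ count}, first-occurrence order
theorem agrupar_eq (l : List Int) :
    agrupar l = (PySem.List.dedup l).map (fun m => (m, (l.count m : Int))) := by
  induction hn : l.length using Nat.strong_induction_on generalizing l with
  | _ n ih =>
    match l with
    | [] => simp [agrupar, PySem.List.dedup, PySem.Set.ofList, PySem.Set.empty]
    | m :: rest =>
      have hresto : (m :: rest).filter (fun x => x ≠ m) = rest.filter (fun x => x ≠ m) := by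
        simp
      have hlen : (rest.filter (fun x => x ≠ m)).length < n := by
        have := List.length_filter_le (fun x => decide (x ≠ m)) rest
        simp only [← hn, List.length_cons]; omega
      have ihr := ih _ hlen (rest.filter (fun x => x ≠ m)) rfl
      rw [agrupar]
      simp only [hresto]
      rw [ihr, dedup_cons_filter]
      have hsplit := length_filter_add_count m rest
      simp only [List.map_cons, List.cons.injEq, Prod.mk.injEq]
      refine ⟨⟨trivial, ?_⟩, ?_⟩
      · -- head pair: count m (m::rest) = length (m::rest) - length resto
        simp only [List.count_cons_self, List.length_cons]
        push_cast
        omega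
      · -- tail: counts in resto equal counts in m::rest for keys ≠ m
        apply List.map_congr_left
        intro k hk
        have hkmem : k ∈ rest.filter (fun x => x ≠ m) := by
          have : k ∈ PySem.List.dedup (rest.filter (fun x => x ≠ m)) := hk
          rw [PySem.List.mem_dedup] at this
          exact this
        have hkne : k ≠ m := by
          have := List.of_mem_filter hkmem
          simpa using this
        rw [count_filter_ne rest k m hkne]
        simp [Ne.symm hkne]

-- A's membership-tested accumulating dict, as items, is {distinct minute ↦ count}
theorem inner_eq (llegadas : List Int) (division_minutos : Int) :
    (llegadas.foldl (fun dic tiempo =>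
      let minuto := PySem.Int.floordiv tiempo division_minutos
      if dic.contains minuto then dic.insert minuto (dic.getD minuto 0 + 1)
      else dic.insert minuto 1) (PySem.Dict.empty : PySem.Dict Int Int)).items =
    agrupar (llegadas.map (fun t => PySem.Int.floordiv t division_minutos)) := by
  have hstep : (fun (dic : PySem.Dict Int Int) (tiempo : Int) =>
      let minuto := PySem.Int.floordiv tiempo division_minutos
      if dic.contains minuto then dic.insert minuto (dic.getD minuto 0 + 1)
      else dic.insert minuto 1) =
      (fun (dic : PySem.Dict Int Int) (tiempo : Int) =>
        dic.insert (PySem.Int.floordiv tiempo division_minutos)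
          (dic.getD (PySem.Int.floordiv tiempo division_minutos) 0 + 1)) := by
    funext dic tiempo
    simp only
    split_ifs with h
    · rfl
    · rw [PySem.Dict.getD_of_not_contains dic 0 (by simpa using h)]; norm_num
  have h2 : llegadas.foldl (fun (dic : PySem.Dict Int Int) tiempo =>
      let minuto := PySem.Int.floordiv tiempo division_minutos
      if dic.contains minuto then dic.insert minuto (dic.getD minuto 0 + 1)
      else dic.insert minuto 1) PySem.Dict.empty =
      (llegadas.map (fun tiempo => PySem.Int.floordiv tiempo division_minutos)).foldl
        (fun (dic : PySem.Dict Int Int) m => dic.insert m (dic.getD m 0 + 1)) PySem.Dict.empty := by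
    rw [List.foldl_map, hstep]
  rw [h2, PySem.Dict.foldl_insert_getD_add_one_eq_counter, PySem.Dict.items_counter]
  rw [agrupar_eq]
  simp [PySem.List.dedup_eq_ofList]

-- ===== VERDICT (by name: the statement is the Claim_ definition above) =====
theorem procesar_tiempos_spec : Claim_equal_procesar_tiempos := by
  intro all_llegadas division_minutos _ _
  unfold Spec_procesar_tiempos procesar_tiempos procesar_tiempos_alt
  rw [PySem.List.foldl_append_singleton_eq_map]
  exact List.map_congr_left (fun llegadas _ => inner_eq llegadas division_minutos)
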